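-- pv_equiv track=rewrite | github.com/programmer-k/Baekjoon-Online-Judge-Submission | 6679.py | ConvTok
-- ===== SOURCE A (Python) =====
-- def NumToAlpha(num):
-- 	""" 숫자를 알파벳으로 변환한 후 반환한다. """
-- 	if num == 10:
-- 		return 'A'
-- 	elif num == 11:
-- 		return 'B'
-- 	elif num == 12:
-- 		return 'C'
-- 	elif num == 13:
-- 		return 'D'
-- 	elif num == 14:
-- 		return 'E'
-- 	elif num == 15:
-- 		return 'F'
--
-- def ConvTok(num, k):
-- 	""" 10진수를 k진수로 변환해서 문자열로 반환한다. """
-- 	s = ''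
-- 	for i in range(3, -1, -1):
-- 		temp = num // (k ** i)
--
-- 		# 숫자가 10보다 같거나 크면 한자리로 표현할 수 없으므로 알파벳으로 대신 표현한다.
-- 		if temp >= 10:
-- 			s += NumToAlpha(temp)
-- 		else:
-- 			s += str(temp)
-- 		num %= (k ** i)
--
-- 	return s
-- ===== SOURCE B (Python) =====
-- def NumToAlpha(num):
-- 	""" 숫자를 알파벳으로 변환한 후 반환한다. """
-- 	if num == 10:
-- 		return 'A'
-- 	elif num == 11:
-- 		return 'B'
-- 	elif num == 12:
-- 		return 'C'
-- 	elif num == 13: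
-- 		return 'D'
-- 	elif num == 14:
-- 		return 'E'
-- 	elif num == 15:
-- 		return 'F'
--
-- def ConvTok(num, k):
-- 	""" 10진수를 k진수로 변환해서 문자열로 반환한다. """
-- 	# quotient ladder num // k**0 .. num // k**3; each digit is the difference
-- 	# of two consecutive scaled quotients, the top digit is the last quotient.
-- 	qs = [num // k ** i for i in range(4)]
-- 	digits = [qs[3]] + [qs[i] - qs[i + 1] * k for i in (2, 1, 0)]
-- 	s = ''
-- 	for d in digits:
-- 		s += NumToAlpha(d) if d >= 10 else str(d)
-- 	return s
-- ===== Notes on version B (the rewrite author's own statement) =====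
-- stated objective: alternative
-- what changed: A extracts digits by a descending-power loop with a running remainder (temp = num // k**i; num %= k**i); B never takes a remainder at all: it builds the quotient ladder qs = [num // k**i for i in range(4)] and recovers each digit as the difference of consecutive scaled quotients (qs[i] - qs[i+1]*k), with the top digit being the last quotient.
import Mathlib
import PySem

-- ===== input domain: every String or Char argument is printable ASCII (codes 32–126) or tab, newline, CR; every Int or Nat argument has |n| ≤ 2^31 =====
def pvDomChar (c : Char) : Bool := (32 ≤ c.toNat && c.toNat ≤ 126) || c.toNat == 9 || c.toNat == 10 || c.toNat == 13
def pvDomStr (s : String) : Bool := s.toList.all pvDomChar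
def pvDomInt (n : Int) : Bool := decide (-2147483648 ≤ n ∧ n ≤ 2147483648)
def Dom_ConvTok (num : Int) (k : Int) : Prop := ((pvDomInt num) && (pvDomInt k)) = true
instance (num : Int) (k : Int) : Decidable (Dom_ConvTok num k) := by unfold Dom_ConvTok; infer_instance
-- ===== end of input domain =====

-- B replaces A's running-remainder digit extraction (num //= and %= descending powers) by a
-- quotient ladder num // k^0 .. num // k^3 from which each digit is recovered as a difference
-- of consecutive scaled quotients — no modulo at all (objective: alternative).

-- ===== PORT A =====
-- NumToAlpha returns a str for 10..15 and None otherwise; None is modelled by Option.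
def numToAlphaA (num : Int) : Option String :=
  if num = 10 then some "A"
  else if num = 11 then some "B"
  else if num = 12 then some "C"
  else if num = 13 then some "D"
  else if num = 14 then some "E"
  else if num = 15 then some "F"
  else none

-- loop 'for i in range(3, -1, -1)' with state (s, num); 'i.toNat' is exact since pyRange yields 3,2,1,0;
-- 's += NumToAlpha(temp)' raises TypeError when NumToAlpha gives None — those inputs are outside Pre_
-- (the getD "" default is never reached under Pre_).
def ConvTok (num : Int) (k : Int) : String :=
  ((PySem.List.pyRange 3 (-1) (-1)).foldl
    (fun st i =>
      let temp := PySem.Int.floordiv st.2 (k ^ i.toNat)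
      (if temp ≥ 10 then st.1 ++ (numToAlphaA temp).getD "" else st.1 ++ PySem.Int.toStr temp,
       PySem.Int.mod st.2 (k ^ i.toNat)))
    ("", num)).1

-- ===== PORT B =====
def numToAlphaB (num : Int) : Option String :=
  if num = 10 then some "A"
  else if num = 11 then some "B"
  else if num = 12 then some "C"
  else if num = 13 then some "D"
  else if num = 14 then some "E"
  else if num = 15 then some "F"
  else none

-- qs = [num // k**i for i in range(4)]; digits = [qs[3]] + [qs[i] - qs[i+1]*k for i in (2,1,0)];
-- then a plain accumulating loop over digits ('s += …').  qs[i] is pyGetD (indices are in range).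
def ConvTok_alt (num : Int) (k : Int) : String :=
  let qs : List Int := (PySem.List.pyRange 0 4 1).map (fun i => PySem.Int.floordiv num (k ^ i.toNat))
  let digits : List Int :=
    [PySem.List.pyGetD qs 3 0] ++
      ([2, 1, 0] : List Int).map (fun i => PySem.List.pyGetD qs i 0 - PySem.List.pyGetD qs (i + 1) 0 * k)
  digits.foldl
    (fun s d => s ++ (if d ≥ 10 then (numToAlphaB d).getD "" else PySem.Int.toStr d)) ""

-- ===== PRECONDITION & SPEC =====
-- Pre_ excludes exactly the inputs where A raises: k = 0 (ZeroDivisionError) and any digit ≥ 16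
-- (NumToAlpha returns None and 's += None' raises TypeError).
def Pre_ConvTok (num : Int) (k : Int) : Prop :=
  k ≠ 0 ∧ PySem.Int.floordiv num (k ^ 3) < 16
    ∧ PySem.Int.floordiv (PySem.Int.mod num (k ^ 3)) (k ^ 2) < 16
    ∧ PySem.Int.floordiv (PySem.Int.mod num (k ^ 2)) k < 16
    ∧ PySem.Int.mod num k < 16
instance (num : Int) (k : Int) : Decidable (Pre_ConvTok num k) := by unfold Pre_ConvTok; infer_instance

def pvWitness_ConvTok : Int × Int := (255, 16)

def Spec_ConvTok (num : Int) (k : Int) (out : String) : Prop := out = ConvTok_alt num k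
instance (num : Int) (k : Int) (out : String) : Decidable (Spec_ConvTok num k out) := by unfold Spec_ConvTok; infer_instance

-- ===== CLAIM (what is proved, stated in full; the proofs are below) =====
def Claim_equal_ConvTok : Prop := ∀ (num : Int) (k : Int), Dom_ConvTok num k → Pre_ConvTok num k → Spec_ConvTok num k (ConvTok num k)

-- ===== LEMMAS AND PROOFS =====

-- uniqueness of Python's floor divmod: a quotient/remainder pair with the remainder in the
-- divisor-sign range is THE floordiv/mod pair
lemma pyDivMod_uniq (a b q r : Int) (hb : b ≠ 0) (ha : a = q * b + r)
    (hpos : 0 < b → 0 ≤ r ∧ r < b) (hneg : b < 0 → b < r ∧ r ≤ 0) :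
    PySem.Int.floordiv a b = q ∧ PySem.Int.mod a b = r := by
  have hdm := PySem.Int.floordiv_mul_add_mod a b
  set f := PySem.Int.floordiv a b with hf
  set m := PySem.Int.mod a b with hm
  have key : (f - q) * b = r - m := by ring_nf; linarith [hdm, ha]
  have hbnd : -|b| < r - m ∧ r - m < |b| := by
    rcases lt_or_gt_of_ne hb with hb' | hb'
    · have h1 := hneg hb'
      have h2 := PySem.Int.mod_neg_bounds a hb'
      rw [abs_of_neg hb']; constructor <;> omega
    · have h1 := hpos hb'
      have h2 := PySem.Int.mod_nonneg a hb'
      have h3 := PySem.Int.mod_lt a hb'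
      rw [abs_of_pos hb']; constructor <;> omega
  have hz : f - q = 0 := by
    by_contra h
    have h1 : 1 ≤ |f - q| := Int.one_le_abs (by omega)
    have h2 : |b| ≤ |f - q| * |b| := le_mul_of_one_le_left (abs_nonneg b) h1
    have h3 : |(f - q) * b| = |f - q| * |b| := abs_mul _ _
    have h4 : |(f - q) * b| < |b| := by rw [key]; exact abs_lt.mpr hbnd
    linarith
  have hr : r - m = 0 := by rw [← key, hz, zero_mul]
  exact ⟨by omega, by omega⟩

-- shifting a by a multiple of b shifts floordiv and fixes mod
lemma pyShift (a m b : Int) (hb : b ≠ 0) :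
    PySem.Int.floordiv (a - m * b) b = PySem.Int.floordiv a b - m ∧
      PySem.Int.mod (a - m * b) b = PySem.Int.mod a b := by
  have hdm := PySem.Int.floordiv_mul_add_mod a b
  refine pyDivMod_uniq _ _ _ _ hb (by linarith) ?_ ?_
  · intro h; exact ⟨PySem.Int.mod_nonneg a h, PySem.Int.mod_lt a h⟩
  · intro h; exact PySem.Int.mod_neg_bounds a h

-- A's second digit (after num %= k^3) as a difference of scaled quotients
lemma digit2 (num k : Int) (hk : k ≠ 0) :
    PySem.Int.floordiv (PySem.Int.mod num (k ^ 3)) (k ^ 2)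
      = PySem.Int.floordiv num (k ^ 2) - PySem.Int.floordiv num (k ^ 3) * k := by
  have h3 := PySem.Int.floordiv_mul_add_mod num (k ^ 3)
  have hr : PySem.Int.mod num (k ^ 3) = num - (PySem.Int.floordiv num (k ^ 3) * k) * (k ^ 2) := by
    linear_combination h3
  rw [hr]; exact (pyShift num _ (k ^ 2) (pow_ne_zero 2 hk)).1

-- the running remainder collapses: (num % k^3) % k^2 = num % k^2
lemma collapse2 (num k : Int) (hk : k ≠ 0) :
    PySem.Int.mod (PySem.Int.mod num (k ^ 3)) (k ^ 2) = PySem.Int.mod num (k ^ 2) := by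
  have h3 := PySem.Int.floordiv_mul_add_mod num (k ^ 3)
  have hr : PySem.Int.mod num (k ^ 3) = num - (PySem.Int.floordiv num (k ^ 3) * k) * (k ^ 2) := by
    linear_combination h3
  rw [hr]; exact (pyShift num _ (k ^ 2) (pow_ne_zero 2 hk)).2

lemma digit1 (num k : Int) (hk : k ≠ 0) :
    PySem.Int.floordiv (PySem.Int.mod num (k ^ 2)) k
      = PySem.Int.floordiv num k - PySem.Int.floordiv num (k ^ 2) * k := by
  have h2 := PySem.Int.floordiv_mul_add_mod num (k ^ 2)
  have hr : PySem.Int.mod num (k ^ 2) = num - (PySem.Int.floordiv num (k ^ 2) * k) * k := by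
    linear_combination h2
  rw [hr]; exact (pyShift num _ k hk).1

lemma collapse1 (num k : Int) (hk : k ≠ 0) :
    PySem.Int.mod (PySem.Int.mod num (k ^ 2)) k = PySem.Int.mod num k := by
  have h2 := PySem.Int.floordiv_mul_add_mod num (k ^ 2)
  have hr : PySem.Int.mod num (k ^ 2) = num - (PySem.Int.floordiv num (k ^ 2) * k) * k := by
    linear_combination h2
  rw [hr]; exact (pyShift num _ k hk).2

lemma digit0 (num k : Int) : PySem.Int.mod num k = num - PySem.Int.floordiv num k * k := by
  have h1 := PySem.Int.floordiv_mul_add_mod num k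
  linarith

lemma numToAlpha_eq : numToAlphaB = numToAlphaA := rfl

lemma fdiv_one (a : Int) : PySem.Int.floordiv a 1 = a := by simp [PySem.Int.floordiv]

lemma pyRange_3down : PySem.List.pyRange 3 (-1) (-1) = [3, 2, 1, 0] := by decide

lemma pyRange_0to4 : PySem.List.pyRange 0 4 1 = [0, 1, 2, 3] := by decide

-- ===== VERDICT (by name: the statement is the Claim_ definition above) =====
theorem ConvTok_spec : Claim_equal_ConvTok := by
  intro num k _ hpre
  obtain ⟨hk, -, -, -, -⟩ := hpre
  unfold Spec_ConvTok ConvTok ConvTok_alt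
  rw [pyRange_3down, pyRange_0to4]
  simp only [List.map, List.foldl, List.cons_append, List.nil_append,
    show Int.toNat 3 = 3 from rfl, show Int.toNat 2 = 2 from rfl,
    show Int.toNat 1 = 1 from rfl, show Int.toNat 0 = 0 from rfl,
    pow_zero, pow_one, PySem.List.pyGetD]
  norm_num [PySem.List.pyIdx?, PySem.List.pyGet?, fdiv_one, numToAlpha_eq, show Int.toNat 3 = 3 from rfl, show Int.toNat 2 = 2 from rfl,
    show Int.toNat 1 = 1 from rfl, List.getElem_cons_succ, List.getElem_cons_zero,
    List.getElem?_cons_succ, List.getElem?_cons_zero,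
    digit2 num k hk, collapse2 num k hk, digit1 num k hk, collapse1 num k hk, digit0 num k]
  split_ifs <;> rfl
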